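-- pv_equiv track=rewrite | github.com/algbio/SRFAligner | experiments/aligner-evaluation/scripts/compute_summary.py | parse_gaf
-- ===== SOURCE A (Python) =====
-- def parse_gaf(raw_gaf, vertex_labels):
--
--     id, path, rev, f_o, l_o = raw_gaf
--
--     if rev:
--         rev_cnt = len(path)
--         first_node_off, last_node_off = len(vertex_labels[path[0]]) - f_o, len(vertex_labels[path[-1]]) - l_o
--     else:
--         rev_cnt = 0
--         first_node_off, last_node_off = f_o, l_o
--
--
--     seqs = list()
--     n = len(path)
--
--     for idx, node_id in enumerate(path):
--
--         ll = vertex_labels[node_id]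
--         original_length = len(ll)
--
--         if idx == 0 and idx == n - 1:
--             if rev_cnt > 0:
--                 ll = ll[last_node_off:first_node_off]
--             else:
--                 ll = ll[first_node_off:last_node_off]
--         elif idx == 0:
--             if rev_cnt > 0:
--                 ll = ll[:first_node_off]
--             else:
--                 ll = ll[first_node_off:]
--         elif idx == n - 1:
--             if rev_cnt > 0:
--                 ll = ll[last_node_off:]
--             else:
--                 ll = ll[:last_node_off]
--
--         if rev_cnt > 0:
--             ll = ''.join({'A': 'T', 'T': 'A', 'C': 'G', 'G': 'C', 'N': 'N'}[b] for b in ll[::-1])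
--             if idx < n - 1:
--                 last_node_off += original_length
--         else:
--             if idx < n - 1:
--                 last_node_off -= original_length
--
--         seqs.append(ll)
--
--     seq = ''.join(seqs)
--
--     return id, seq, n, rev_cnt, len(seq), path, first_node_off, last_node_off
-- ===== SOURCE B (Python) =====
-- _COMP = {'A': 'T', 'T': 'A', 'C': 'G', 'G': 'C', 'N': 'N'}
--
--
-- def _cut(i, m):
--     # index i resolved against length m, Python slice-style
--     if i < 0:
--         i += m
--     return 0 if i < 0 else (m if i > m else i)
--
--
-- def parse_gaf(raw_gaf, vertex_labels):
--     id, path, rev, f_o, l_o = raw_gaf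
--     n = len(path)
--     if n == 0:
--         return id, '', 0, 0, 0, path, f_o, l_o
--     labels = [vertex_labels[v] for v in path]
--     first_len, last_len = len(labels[0]), len(labels[-1])
--     total = sum(len(l) for l in labels)
--     prefix = total - last_len
--     if rev:
--         rev_cnt = n
--         first_node_off = first_len - f_o
--         last_node_off = (last_len - l_o) + prefix
--         whole = ''.join(reversed(labels))
--         start = _cut(last_node_off, last_len)
--         stop = total - first_len + _cut(first_node_off, first_len)
--         core = whole[start:stop]
--         seq = ''.join(_COMP[b] for b in reversed(core))
--     else:
--         rev_cnt = 0
--         first_node_off = f_o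
--         last_node_off = l_o - prefix
--         whole = ''.join(labels)
--         start = _cut(first_node_off, first_len)
--         stop = total - last_len + _cut(last_node_off, last_len)
--         seq = whole[start:stop]
--     return id, seq, n, rev_cnt, len(seq), path, first_node_off, last_node_off
-- ===== Notes on version B (the rewrite author's own statement) =====
-- stated objective: alternative
-- what changed: B replaces A's stateful per-node loop (a running last_node_off accumulator, per-node slicing and per-piece complementing) by a global construction: it concatenates all labels once (in reversed node order when rev), derives the two cut points in closed form from the total/prefix label mass, takes a single global slice of that one string, and reverse-complements it in a single final pass.
import Mathlib
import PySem

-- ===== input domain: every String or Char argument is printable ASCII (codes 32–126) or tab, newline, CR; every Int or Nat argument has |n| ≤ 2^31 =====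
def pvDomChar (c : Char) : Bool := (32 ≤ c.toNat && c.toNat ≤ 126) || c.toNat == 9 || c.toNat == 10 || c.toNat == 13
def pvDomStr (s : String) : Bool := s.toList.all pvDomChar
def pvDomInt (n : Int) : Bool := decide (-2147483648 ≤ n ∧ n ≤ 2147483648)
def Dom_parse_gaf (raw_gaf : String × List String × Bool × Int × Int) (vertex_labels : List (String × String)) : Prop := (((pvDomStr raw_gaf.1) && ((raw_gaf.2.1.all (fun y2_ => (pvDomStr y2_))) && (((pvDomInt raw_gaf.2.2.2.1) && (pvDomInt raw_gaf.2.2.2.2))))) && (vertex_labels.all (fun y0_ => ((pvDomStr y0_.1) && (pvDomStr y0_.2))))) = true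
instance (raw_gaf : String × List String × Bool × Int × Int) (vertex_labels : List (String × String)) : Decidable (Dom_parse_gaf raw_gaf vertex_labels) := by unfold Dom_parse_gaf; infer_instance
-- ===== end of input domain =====

-- B replaces A's stateful per-node loop (running offset accumulator, per-node slicing,
-- per-piece complementing) by a global construction: concatenate all labels once (in
-- reversed node order when rev), derive the two cut points in closed form from the
-- total/prefix label mass, take ONE global slice and reverse-complement it in one pass.
-- Same return value on Pre_ (objective: alternative; no speed claim).
-- The ports model the complement dict and the vertex_labels lookups with total helpers
-- whose default values are only reached outside Pre_parse_gaf (where the Pythons raise).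

-- the complement dict {'A':'T','T':'A','C':'G','G':'C','N':'N'}; any other char is a KeyError
-- in Python (excluded by Pre_parse_gaf), here defaulted to 'N'
def pvComp (c : Char) : Char :=
  if c = 'A' then 'T' else if c = 'T' then 'A' else if c = 'C' then 'G'
  else if c = 'G' then 'C' else 'N'

-- vertex_labels[v] as a char list; a missing key is a KeyError in Python (excluded by
-- Pre_parse_gaf), here defaulted to the empty label
def pvLab (vertex_labels : List (String × String)) (v : String) : List Char :=
  ((PySem.Dict.get? ⟨vertex_labels⟩ v).getD "").toList

-- the body of A's for-loop (one iteration; state = (last_node_off, seqs))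
def pvStepA (vertex_labels : List (String × String)) (n rev_cnt first_node_off : Int) (st : Int × List (List Char)) (p : Int × String) : Int × List (List Char) :=
  let idx := p.1
  let ll0 := pvLab vertex_labels p.2
  let original_length : Int := (ll0.length : Int)
  let ll1 :=
    if idx = 0 ∧ idx = n - 1 then
      (if rev_cnt > 0 then PySem.List.slice ll0 (some st.1) (some first_node_off)
       else PySem.List.slice ll0 (some first_node_off) (some st.1))
    else if idx = 0 then
      (if rev_cnt > 0 then PySem.List.slice ll0 none (some first_node_off)
       else PySem.List.slice ll0 (some first_node_off) none)
    else if idx = n - 1 then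
      (if rev_cnt > 0 then PySem.List.slice ll0 (some st.1) none
       else PySem.List.slice ll0 none (some st.1))
    else ll0
  let ll2 := if rev_cnt > 0 then ll1.reverse.map pvComp else ll1
  let off' :=
    if rev_cnt > 0 then (if idx < n - 1 then st.1 + original_length else st.1)
    else (if idx < n - 1 then st.1 - original_length else st.1)
  (off', st.2 ++ [ll2])

-- ===== PORT A =====
def parse_gaf (raw_gaf : String × List String × Bool × Int × Int) (vertex_labels : List (String × String)) : String × String × Int × Int × Int × List String × Int × Int :=
  let id := raw_gaf.1
  let path := raw_gaf.2.1
  let rev := raw_gaf.2.2.1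
  let f_o := raw_gaf.2.2.2.1
  let l_o := raw_gaf.2.2.2.2
  let n : Int := (path.length : Int)
  let rev_cnt : Int := if rev then n else 0
  let first_node_off : Int :=
    if rev then ((pvLab vertex_labels ((PySem.List.pyGet? path 0).getD "")).length : Int) - f_o
    else f_o
  let init_last : Int :=
    if rev then ((pvLab vertex_labels ((PySem.List.pyGet? path (-1)).getD "")).length : Int) - l_o
    else l_o
  let st := (PySem.List.enumerate path 0).foldl (pvStepA vertex_labels n rev_cnt first_node_off) (init_last, [])
  let seq := st.2.flatten
  (id, String.ofList seq, n, rev_cnt, (seq.length : Int), path, first_node_off, st.1)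

-- B's index resolution _cut(i, m): Python slice-style clamp of i against length m
def pvCut (i m : Int) : Int :=
  let i2 := if i < 0 then i + m else i
  if i2 < 0 then 0 else if i2 > m then m else i2

-- ===== PORT B =====
def parse_gaf_alt (raw_gaf : String × List String × Bool × Int × Int) (vertex_labels : List (String × String)) : String × String × Int × Int × Int × List String × Int × Int :=
  let id := raw_gaf.1
  let path := raw_gaf.2.1
  let rev := raw_gaf.2.2.1
  let f_o := raw_gaf.2.2.2.1
  let l_o := raw_gaf.2.2.2.2
  let n : Int := (path.length : Int)
  if n = 0 then (id, "", 0, 0, 0, path, f_o, l_o)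
  else
    let labels := path.map (pvLab vertex_labels)
    let first_len : Int := (((PySem.List.pyGet? labels 0).getD []).length : Int)
    let last_len : Int := (((PySem.List.pyGet? labels (-1)).getD []).length : Int)
    let total : Int := (labels.map (fun l => (l.length : Int))).sum
    let pre_ := total - last_len
    if rev then
      let rev_cnt := n
      let first_node_off := first_len - f_o
      let last_node_off := (last_len - l_o) + pre_
      let whole := labels.reverse.flatten
      let start := pvCut last_node_off last_len
      let stop := total - first_len + pvCut first_node_off first_len
      let core := PySem.List.slice whole (some start) (some stop)
      let seq := core.reverse.map pvComp
      (id, String.ofList seq, n, rev_cnt, (seq.length : Int), path, first_node_off, last_node_off)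
    else
      let rev_cnt : Int := 0
      let first_node_off := f_o
      let last_node_off := l_o - pre_
      let whole := labels.flatten
      let start := pvCut first_node_off first_len
      let stop := total - last_len + pvCut last_node_off last_len
      let seq := PySem.List.slice whole (some start) (some stop)
      (id, String.ofList seq, n, rev_cnt, (seq.length : Int), path, first_node_off, last_node_off)

-- ===== PRECONDITION & SPEC =====

-- prefix mass: sum of label lengths of all but the last node (the value A's accumulator
-- has reached when it slices the last node)
def pvS (vl : List (String × String)) (l : List String) : Int :=
  (l.dropLast.map (fun v => ((pvLab vl v).length : Int))).sum

def pvOK (c : Char) : Bool := c == 'A' || c == 'T' || c == 'C' || c == 'G' || c == 'N'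

-- the exact part of node p's label that A feeds the complement dict when rev is set:
-- first node cut at first_node_off, last node cut at the final accumulator value,
-- middle nodes whole (closed-form bounds; no loop)
def pvRegion (vl : List (String × String)) (path : List String) (f_o l_o : Int) (p : Int × String) : List Char :=
  let n : Int := (path.length : Int)
  let first : Int := ((pvLab vl ((PySem.List.pyGet? path 0).getD "")).length : Int) - f_o
  let lastoff : Int := (((pvLab vl ((PySem.List.pyGet? path (-1)).getD "")).length : Int) - l_o) + pvS vl path
  PySem.List.slice (pvLab vl p.2)
    (if p.1 = n - 1 then some lastoff else none)
    (if p.1 = 0 then some first else none)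

-- Pre_ excludes exactly the inputs on which the Python A raises: a path node missing from
-- vertex_labels (KeyError), rev with an empty path (IndexError), and rev with a character
-- outside 'ATCGN' in the part of a label that actually reaches the complement dict (KeyError).
def Pre_parse_gaf (raw_gaf : String × List String × Bool × Int × Int) (vertex_labels : List (String × String)) : Prop :=
  (∀ v ∈ raw_gaf.2.1, (PySem.Dict.get? (⟨vertex_labels⟩ : PySem.Dict String String) v).isSome) ∧
  (raw_gaf.2.2.1 = true → raw_gaf.2.1 ≠ [] ∧
    ∀ p ∈ PySem.List.enumerate raw_gaf.2.1 0,
      (pvRegion vertex_labels raw_gaf.2.1 raw_gaf.2.2.2.1 raw_gaf.2.2.2.2 p).all pvOK = true)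
instance (raw_gaf : String × List String × Bool × Int × Int) (vertex_labels : List (String × String)) : Decidable (Pre_parse_gaf raw_gaf vertex_labels) := by unfold Pre_parse_gaf; infer_instance

def pvWitness_parse_gaf : (String × List String × Bool × Int × Int) × (List (String × String)) :=
  (("r1", ["v1", "v2"], true, 1, 2), [("v1", "ACGT"), ("v2", "TTN")])

def Spec_parse_gaf (raw_gaf : String × List String × Bool × Int × Int) (vertex_labels : List (String × String)) (out : String × String × Int × Int × Int × List String × Int × Int) : Prop := out = parse_gaf_alt raw_gaf vertex_labels
instance (raw_gaf : String × List String × Bool × Int × Int) (vertex_labels : List (String × String)) (out : String × String × Int × Int × Int × List String × Int × Int) : Decidable (Spec_parse_gaf raw_gaf vertex_labels out) := by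
  unfold Spec_parse_gaf
  haveI h3 : DecidableEq (List String × Int × Int) := fun x y => instDecidableEqProd x y
  haveI h4 : DecidableEq (Int × List String × Int × Int) := fun x y => instDecidableEqProd x y
  haveI h5 : DecidableEq (Int × Int × List String × Int × Int) := fun x y => instDecidableEqProd x y
  haveI h6 : DecidableEq (Int × Int × Int × List String × Int × Int) := fun x y => instDecidableEqProd x y
  haveI h7 : DecidableEq (String × Int × Int × Int × List String × Int × Int) := fun x y => instDecidableEqProd x y
  infer_instance

-- ===== CLAIM (what is proved, stated in full; the proofs are below) =====
def Claim_equal_parse_gaf : Prop := ∀ (raw_gaf : String × List String × Bool × Int × Int) (vertex_labels : List (String × String)), Dom_parse_gaf raw_gaf vertex_labels → Pre_parse_gaf raw_gaf vertex_labels → Spec_parse_gaf raw_gaf vertex_labels (parse_gaf raw_gaf vertex_labels)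

-- ===== LEMMAS AND PROOFS =====

-- A's per-node piece in stateless form (offsets precomputed); proof-side bridge between
-- A's fold and B's global slice
def pvPieceB (vertex_labels : List (String × String)) (rev : Bool) (n first_node_off last_node_off : Int) (p : Int × String) : List Char :=
  let idx := p.1
  let ll0 := pvLab vertex_labels p.2
  let start : Option Int :=
    if rev then (if idx = n - 1 then some last_node_off else none)
    else (if idx = 0 then some first_node_off else none)
  let stop : Option Int :=
    if rev then (if idx = 0 then some first_node_off else none)
    else (if idx = n - 1 then some last_node_off else none)
  let ll1 := PySem.List.slice ll0 start stop
  if rev then ll1.reverse.map pvComp else ll1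

theorem pvS_cons (vl : List (String × String)) (v : String) {l : List String} (h : l ≠ []) :
    pvS vl (v :: l) = ((pvLab vl v).length : Int) + pvS vl l := by
  simp [pvS, List.dropLast_cons_of_ne_nil h]

-- A's loop over the tail of the path (indices ≥ 1), non-reversed
theorem pvFoldA_nonrev (vl : List (String × String)) (n first : Int) (l : List String) :
    ∀ (i off : Int) (acc : List (List Char)), 1 ≤ i → i + (l.length : Int) = n →
    (PySem.List.enumerate l i).foldl (pvStepA vl n 0 first) (off, acc)
      = (off - pvS vl l,
         acc ++ (PySem.List.enumerate l i).map (fun p =>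
           if p.1 = n - 1 then PySem.List.slice (pvLab vl p.2) none (some (off - pvS vl l))
           else pvLab vl p.2)) := by
  induction l with
  | nil => intro i off acc hi hn; simp [PySem.List.enumerate_nil, pvS]
  | cons v rest ih =>
    intro i off acc hi hn
    rw [PySem.List.enumerate_cons]
    cases rest with
    | nil =>
      have h1 : i = n - 1 := by simp at hn; omega
      have h3 : ¬ (n - 1 = 0) := by omega
      simp [pvStepA, h1, h3, PySem.List.enumerate_nil, pvS]
    | cons w t =>
      have h0 : ¬ (i = 0) := by omega
      have h1 : ¬ (i = n - 1) := by simp at hn; omega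
      have h2 : i < n - 1 := by simp at hn; omega
      have hstep : pvStepA vl n 0 first (off, acc) (i, v)
          = (off - ((pvLab vl v).length : Int), acc ++ [pvLab vl v]) := by
        simp [pvStepA, h0, h1, h2]
      rw [List.foldl_cons, hstep,
        ih (i + 1) (off - ((pvLab vl v).length : Int)) (acc ++ [pvLab vl v]) (by omega)
          (by simp at hn ⊢; omega)]
      have hS : off - ((pvLab vl v).length : Int) - pvS vl (w :: t) = off - pvS vl (v :: w :: t) := by
        rw [pvS_cons vl v (by simp)]; ring
      rw [hS]
      simp [h1]

-- same loop, reversed (any rev_cnt > 0)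
theorem pvFoldA_rev (vl : List (String × String)) (n first rc : Int) (hrc : 0 < rc) (l : List String) :
    ∀ (i off : Int) (acc : List (List Char)), 1 ≤ i → i + (l.length : Int) = n →
    (PySem.List.enumerate l i).foldl (pvStepA vl n rc first) (off, acc)
      = (off + pvS vl l,
         acc ++ (PySem.List.enumerate l i).map (fun p =>
           (if p.1 = n - 1 then PySem.List.slice (pvLab vl p.2) (some (off + pvS vl l)) none
            else pvLab vl p.2).reverse.map pvComp)) := by
  induction l with
  | nil => intro i off acc hi hn; simp [PySem.List.enumerate_nil, pvS]
  | cons v rest ih =>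
    intro i off acc hi hn
    rw [PySem.List.enumerate_cons]
    cases rest with
    | nil =>
      have h1 : i = n - 1 := by simp at hn; omega
      have h3 : ¬ (n - 1 = 0) := by omega
      simp [pvStepA, h1, h3, hrc, PySem.List.enumerate_nil, pvS]
    | cons w t =>
      have h0 : ¬ (i = 0) := by omega
      have h1 : ¬ (i = n - 1) := by simp at hn; omega
      have h2 : i < n - 1 := by simp at hn; omega
      have hstep : pvStepA vl n rc first (off, acc) (i, v)
          = (off + ((pvLab vl v).length : Int), acc ++ [(pvLab vl v).reverse.map pvComp]) := by
        simp [pvStepA, h0, h1, h2, hrc]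
      rw [List.foldl_cons, hstep,
        ih (i + 1) (off + ((pvLab vl v).length : Int)) (acc ++ [(pvLab vl v).reverse.map pvComp]) (by omega)
          (by simp at hn ⊢; omega)]
      have hS : off + ((pvLab vl v).length : Int) + pvS vl (w :: t) = off + pvS vl (v :: w :: t) := by
        rw [pvS_cons vl v (by simp)]; ring
      rw [hS]
      simp [h1]

-- A's whole loop on a path of length ≥ 2 equals the stateless pieces, non-reversed
theorem pvKey_nonrev (vl : List (String × String)) (first init : Int) (v : String)
    (rest : List String) (hrest : rest ≠ []) (N : Int)
    (hN : N = ((v :: rest : List String).length : Int)) :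
    (PySem.List.enumerate (v :: rest) 0).foldl (pvStepA vl N 0 first) (init, [])
      = (init - pvS vl (v :: rest),
         (PySem.List.enumerate (v :: rest) 0).map
           (pvPieceB vl false N first (init - pvS vl (v :: rest)))) := by
  have hlen : 1 ≤ rest.length := List.length_pos_of_ne_nil hrest
  have hN' : N = (rest.length : Int) + 1 := by simp [hN]
  have hA : ¬ ((0:Int) = N - 1) := by omega
  have hB : (0:Int) < N - 1 := by omega
  have h1 : pvStepA vl N 0 first (init, []) (0, v)
      = (init - ((pvLab vl v).length : Int), [PySem.List.slice (pvLab vl v) (some first) none]) := by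
    simp [pvStepA, hA]; omega
  rw [PySem.List.enumerate_cons, List.foldl_cons, h1]
  simp only [zero_add]
  rw [pvFoldA_nonrev vl N first rest 1 (init - ((pvLab vl v).length : Int)) _ (by omega)
      (by omega)]
  have hS : init - ((pvLab vl v).length : Int) - pvS vl rest = init - pvS vl (v :: rest) := by
    rw [pvS_cons vl v hrest]; ring
  rw [hS]
  have hp0 : pvPieceB vl false N first (init - pvS vl (v :: rest)) (0, v)
      = PySem.List.slice (pvLab vl v) (some first) none := by
    simp [pvPieceB, hA]
  refine Prod.ext rfl ?_
  conv_rhs => rw [List.map_cons]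
  simp only [hp0, List.singleton_append, List.cons.injEq, true_and]
  refine List.map_congr_left (fun p hp => ?_)
  obtain ⟨k, hk, rfl⟩ := (PySem.List.mem_enumerate_iff _ _ _).mp hp
  have hp1 : ¬ ((1 + (k:Int)) = 0) := by omega
  have hp2 : ¬ (N - 1 = 0) := by omega
  by_cases hlast : (1 + (k:Int)) = N - 1
  · simp [pvPieceB, hp2, hlast]
  · simp [pvPieceB, hp1, hlast, PySem.List.slice_none_none]

-- A's whole loop on a path of length ≥ 2 equals the stateless pieces, reversed
theorem pvKey_rev (vl : List (String × String)) (first init : Int) (v : String)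
    (rest : List String) (hrest : rest ≠ []) (N : Int)
    (hN : N = ((v :: rest : List String).length : Int)) :
    (PySem.List.enumerate (v :: rest) 0).foldl (pvStepA vl N N first) (init, [])
      = (init + pvS vl (v :: rest),
         (PySem.List.enumerate (v :: rest) 0).map
           (pvPieceB vl true N first (init + pvS vl (v :: rest)))) := by
  have hlen : 1 ≤ rest.length := List.length_pos_of_ne_nil hrest
  have hN' : N = (rest.length : Int) + 1 := by simp [hN]
  have hrc : (0:Int) < N := by omega
  have hA : ¬ ((0:Int) = N - 1) := by omega
  have hB : (0:Int) < N - 1 := by omega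
  have h1 : pvStepA vl N N first (init, []) (0, v)
      = (init + ((pvLab vl v).length : Int),
         [(PySem.List.slice (pvLab vl v) none (some first)).reverse.map pvComp]) := by
    simp [pvStepA, hA, hrc]; omega
  rw [PySem.List.enumerate_cons, List.foldl_cons, h1]
  simp only [zero_add]
  rw [pvFoldA_rev vl N first N hrc rest 1 (init + ((pvLab vl v).length : Int)) _ (by omega)
      (by omega)]
  have hS : init + ((pvLab vl v).length : Int) + pvS vl rest = init + pvS vl (v :: rest) := by
    rw [pvS_cons vl v hrest]; ring
  rw [hS]
  have hp0 : pvPieceB vl true N first (init + pvS vl (v :: rest)) (0, v)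
      = (PySem.List.slice (pvLab vl v) none (some first)).reverse.map pvComp := by
    simp [pvPieceB, hA]
  refine Prod.ext rfl ?_
  conv_rhs => rw [List.map_cons]
  simp only [hp0, List.singleton_append, List.cons.injEq, true_and]
  refine List.map_congr_left (fun p hp => ?_)
  obtain ⟨k, hk, rfl⟩ := (PySem.List.mem_enumerate_iff _ _ _).mp hp
  have hp1 : ¬ ((1 + (k:Int)) = 0) := by omega
  have hp2 : ¬ (N - 1 = 0) := by omega
  by_cases hlast : (1 + (k:Int)) = N - 1
  · simp [pvPieceB, hp2, hlast]
  · simp [pvPieceB, hp1, hlast, PySem.List.slice_none_none]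

-- B's _cut is Python's slice-index resolution
theorem pvCut_eq_clampIdx (n : Nat) (i : Int) :
    pvCut i (n : Int) = ((PySem.List.clampIdx n i : Nat) : Int) := by
  simp only [pvCut, PySem.List.clampIdx]
  split_ifs <;> omega

-- xs[:b] as take of the resolved bound (glue over the slice definition)
theorem pvSliceTo (xs : List Char) (b : Int) :
    PySem.List.slice xs none (some b) = xs.take (PySem.List.clampIdx xs.length b) := by
  simp [PySem.List.slice, PySem.List.clampIdx]

-- slicing with already-resolved bounds
theorem pvSliceResolved (xs : List Char) (a b : Int) :
    PySem.List.slice xs (some (pvCut a (xs.length : Int))) (some (pvCut b (xs.length : Int)))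
      = PySem.List.slice xs (some a) (some b) := by
  rw [pvCut_eq_clampIdx, pvCut_eq_clampIdx]
  have ha := PySem.List.clampIdx_le (n := xs.length) (i := a)
  have hb := PySem.List.clampIdx_le (n := xs.length) (i := b)
  simp [PySem.List.slice]

-- the global slice of a three-part concatenation with in-range cut points
theorem pvGlobal (A M B : List Char) (s e : Nat) (hs : s ≤ A.length) :
    ((A ++ (M ++ B)).drop s).take (A.length + M.length + e - s)
      = A.drop s ++ (M ++ B.take e) := by
  have h2 : (A.drop s).length = A.length - s := by simp
  have h1 : s - A.length = 0 := by omega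
  rw [List.drop_append, h1, List.drop_zero, List.take_append, h2]
  have h3 : (A.drop s).take (A.length + M.length + e - s) = A.drop s :=
    List.take_of_length_le (by rw [h2]; omega)
  have h5 : A.length + M.length + e - s - (A.length - s) = M.length + e := by omega
  rw [h3, h5, List.take_append]
  have h4 : M.take (M.length + e) = M := List.take_of_length_le (by omega)
  have h6 : M.length + e - M.length = e := by omega
  rw [h4, h6]

-- sum of label lengths = length of the flattened labels
theorem pvSum_eq_flatten_length (labels : List (List Char)) :
    (labels.map (fun l => (l.length : Int))).sum = (labels.flatten.length : Int) := by
  induction labels with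
  | nil => simp
  | cons x t ih => simp [ih]

-- the stateless pieces flattened, non-reversed: first label cut left, last label cut right
theorem pvFlat_nonrev (vl : List (String × String)) (first last : Int) (v lastv : String)
    (mid : List String) (N : Int) (hN : N = (mid.length : Int) + 2) :
    ((PySem.List.enumerate (v :: (mid ++ [lastv])) 0).map (pvPieceB vl false N first last)).flatten
      = (pvLab vl v).drop (PySem.List.clampIdx (pvLab vl v).length first)
        ++ ((mid.map (pvLab vl)).flatten
        ++ (pvLab vl lastv).take (PySem.List.clampIdx (pvLab vl lastv).length last)) := by
  have hmid : (PySem.List.enumerate mid 1).map (pvPieceB vl false N first last)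
      = mid.map (pvLab vl) := by
    have h1 : (PySem.List.enumerate mid 1).map (pvPieceB vl false N first last)
        = (PySem.List.enumerate mid 1).map (fun p => pvLab vl p.2) := by
      refine List.map_congr_left (fun p hp => ?_)
      obtain ⟨k, hk, rfl⟩ := (PySem.List.mem_enumerate_iff _ _ _).mp hp
      have h0 : ¬ ((1 + (k:Int)) = 0) := by omega
      have h1 : ¬ ((1 + (k:Int)) = N - 1) := by omega
      simp [pvPieceB, h0, h1, PySem.List.slice_none_none]
    rw [h1, show (fun p : Int × String => pvLab vl p.2) = (pvLab vl) ∘ Prod.snd from rfl,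
      ← List.map_map, PySem.List.map_snd_enumerate]
  have hx1 : ¬ ((0:Int) = N - 1) := by omega
  have hx2 : ¬ ((1:Int) + (mid.length : Nat) = 0) := by omega
  have hx3 : ((1:Int) + (mid.length : Nat)) = N - 1 := by omega
  have hx4 : ¬ (N - 1 = 0) := by omega
  rw [PySem.List.enumerate_cons, PySem.List.enumerate_append, PySem.List.enumerate_cons,
    PySem.List.enumerate_nil]
  simp [hmid, pvPieceB, hx1, hx3, hx4, pvSliceTo, PySem.List.slice_some_none]

-- the stateless pieces flattened, reversed: every piece reverse-complemented
theorem pvFlat_rev (vl : List (String × String)) (first last : Int) (v lastv : String)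
    (mid : List String) (N : Int) (hN : N = (mid.length : Int) + 2) :
    ((PySem.List.enumerate (v :: (mid ++ [lastv])) 0).map (pvPieceB vl true N first last)).flatten
      = ((pvLab vl v).take (PySem.List.clampIdx (pvLab vl v).length first)).reverse.map pvComp
        ++ ((mid.map (fun u => (pvLab vl u).reverse.map pvComp)).flatten
        ++ ((pvLab vl lastv).drop (PySem.List.clampIdx (pvLab vl lastv).length last)).reverse.map pvComp) := by
  have hmid : (PySem.List.enumerate mid 1).map (pvPieceB vl true N first last)
      = mid.map (fun u => (pvLab vl u).reverse.map pvComp) := by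
    have h1 : (PySem.List.enumerate mid 1).map (pvPieceB vl true N first last)
        = (PySem.List.enumerate mid 1).map (fun p => (pvLab vl p.2).reverse.map pvComp) := by
      refine List.map_congr_left (fun p hp => ?_)
      obtain ⟨k, hk, rfl⟩ := (PySem.List.mem_enumerate_iff _ _ _).mp hp
      have h0 : ¬ ((1 + (k:Int)) = 0) := by omega
      have h1 : ¬ ((1 + (k:Int)) = N - 1) := by omega
      simp [pvPieceB, h0, h1, PySem.List.slice_none_none]
    rw [h1, show (fun p : Int × String => (pvLab vl p.2).reverse.map pvComp)
        = (fun u => (pvLab vl u).reverse.map pvComp) ∘ Prod.snd from rfl,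
      ← List.map_map, PySem.List.map_snd_enumerate]
  have hx1 : ¬ ((0:Int) = N - 1) := by omega
  have hx2 : ¬ ((1:Int) + (mid.length : Nat) = 0) := by omega
  have hx3 : ((1:Int) + (mid.length : Nat)) = N - 1 := by omega
  have hx4 : ¬ (N - 1 = 0) := by omega
  rw [PySem.List.enumerate_cons, PySem.List.enumerate_append, PySem.List.enumerate_cons,
    PySem.List.enumerate_nil]
  simp [hmid, pvPieceB, hx1, hx3, hx4, pvSliceTo, PySem.List.slice_some_none]

-- a reversed-order concatenation, reversed, is the concatenation of the reversed blocks
-- in forward order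
theorem pvRevFlat {α : Type} (Y : List (List α)) :
    (Y.reverse.flatten).reverse = (Y.map List.reverse).flatten := by
  rw [List.reverse_flatten, List.map_reverse, List.reverse_reverse]

-- the prefix mass of a decomposed path
theorem pvS_concat (vl : List (String × String)) (v lastv : String) (mid : List String) :
    pvS vl (v :: (mid ++ [lastv]))
      = ((pvLab vl v).length : Int) + (((mid.map (pvLab vl)).flatten.length : Nat) : Int) := by
  have h1 : (v :: (mid ++ [lastv])).dropLast = v :: mid := by
    rw [show (v :: (mid ++ [lastv])) = (v :: mid) ++ [lastv] from by simp, List.dropLast_concat]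
  rw [pvS, h1]
  have h2 : (v :: mid).map (fun u => ((pvLab vl u).length : Int))
      = ((v :: mid).map (pvLab vl)).map (fun l => (l.length : Int)) := by
    rw [List.map_map]; rfl
  rw [h2, pvSum_eq_flatten_length]
  simp

-- B's one global slice equals A's three-part concatenation, non-reversed
theorem pvSeq_nonrev (vl : List (String × String)) (v lastv : String) (mid : List String)
    (f_o l_o : Int) :
    PySem.List.slice ((v :: (mid ++ [lastv])).map (pvLab vl)).flatten
        (some (pvCut f_o ((pvLab vl v).length : Int)))
        (some ((((v :: (mid ++ [lastv])).map (pvLab vl)).map (fun l => (l.length : Int))).sum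
                 - ((pvLab vl lastv).length : Int)
               + pvCut (l_o - ((((v :: (mid ++ [lastv])).map (pvLab vl)).map (fun l => (l.length : Int))).sum
                 - ((pvLab vl lastv).length : Int))) ((pvLab vl lastv).length : Int)))
      = (pvLab vl v).drop (PySem.List.clampIdx (pvLab vl v).length f_o)
        ++ ((mid.map (pvLab vl)).flatten
        ++ (pvLab vl lastv).take (PySem.List.clampIdx (pvLab vl lastv).length
              (l_o - pvS vl (v :: (mid ++ [lastv]))))) := by
  have hpre : (((v :: (mid ++ [lastv])).map (pvLab vl)).map (fun l => (l.length : Int))).sum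
      - ((pvLab vl lastv).length : Int) = pvS vl (v :: (mid ++ [lastv])) := by
    rw [pvSum_eq_flatten_length, pvS_concat]
    simp
    omega
  rw [hpre]
  simp only [pvCut_eq_clampIdx]
  rw [pvS_concat]
  rw [show ((pvLab vl v).length : Int) + (((mid.map (pvLab vl)).flatten.length : Nat) : Int)
        + ((PySem.List.clampIdx (pvLab vl lastv).length
             (l_o - (((pvLab vl v).length : Int) + (((mid.map (pvLab vl)).flatten.length : Nat) : Int))) : Nat) : Int)
      = (((pvLab vl v).length + (mid.map (pvLab vl)).flatten.length
          + PySem.List.clampIdx (pvLab vl lastv).length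
              (l_o - (((pvLab vl v).length : Int) + (((mid.map (pvLab vl)).flatten.length : Nat) : Int))) : Nat) : Int) from by push_cast; ring]
  rw [show ((v :: (mid ++ [lastv])).map (pvLab vl)).flatten
      = pvLab vl v ++ ((mid.map (pvLab vl)).flatten ++ pvLab vl lastv) from by simp]
  rw [PySem.List.slice_natCast]
  rw [pvGlobal (pvLab vl v) ((mid.map (pvLab vl)).flatten) (pvLab vl lastv)
      (PySem.List.clampIdx (pvLab vl v).length f_o)
      (PySem.List.clampIdx (pvLab vl lastv).length
        (l_o - (((pvLab vl v).length : Int) + (((mid.map (pvLab vl)).flatten.length : Nat) : Int))))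
      (PySem.List.clampIdx_le _ _)]


-- B's one global slice, reversed and complemented once, equals A's per-piece
-- reverse-complements in forward order
theorem pvSeq_rev (vl : List (String × String)) (v lastv : String) (mid : List String)
    (first last : Int) :
    (PySem.List.slice ((v :: (mid ++ [lastv])).map (pvLab vl)).reverse.flatten
        (some (pvCut last ((pvLab vl lastv).length : Int)))
        (some ((((v :: (mid ++ [lastv])).map (pvLab vl)).map (fun l => (l.length : Int))).sum
                 - ((pvLab vl v).length : Int)
               + pvCut first ((pvLab vl v).length : Int)))).reverse.map pvComp
      = ((pvLab vl v).take (PySem.List.clampIdx (pvLab vl v).length first)).reverse.map pvComp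
        ++ ((mid.map (fun u => (pvLab vl u).reverse.map pvComp)).flatten
        ++ ((pvLab vl lastv).drop (PySem.List.clampIdx (pvLab vl lastv).length last)).reverse.map pvComp) := by
  simp only [pvCut_eq_clampIdx]
  rw [show (((v :: (mid ++ [lastv])).map (pvLab vl)).map (fun l => (l.length : Int))).sum
        - ((pvLab vl v).length : Int)
        + ((PySem.List.clampIdx (pvLab vl v).length first : Nat) : Int)
      = (((pvLab vl lastv).length + (mid.map (pvLab vl)).reverse.flatten.length
          + PySem.List.clampIdx (pvLab vl v).length first : Nat) : Int) from by
        rw [pvSum_eq_flatten_length]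
        simp
        omega]
  rw [show ((v :: (mid ++ [lastv])).map (pvLab vl)).reverse.flatten
      = pvLab vl lastv ++ ((mid.map (pvLab vl)).reverse.flatten ++ pvLab vl v) from by simp]
  rw [PySem.List.slice_natCast]
  rw [pvGlobal (pvLab vl lastv) ((mid.map (pvLab vl)).reverse.flatten) (pvLab vl v)
      (PySem.List.clampIdx (pvLab vl lastv).length last)
      (PySem.List.clampIdx (pvLab vl v).length first)
      (PySem.List.clampIdx_le _ _)]
  simp [pvRevFlat, Function.comp_def]


theorem parse_gaf_agree (raw_gaf : String × List String × Bool × Int × Int)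
    (vertex_labels : List (String × String))
    (hrev : raw_gaf.2.2.1 = true → raw_gaf.2.1 ≠ []) :
    parse_gaf raw_gaf vertex_labels = parse_gaf_alt raw_gaf vertex_labels := by
  obtain ⟨id, path, rev, f_o, l_o⟩ := raw_gaf
  cases path with
  | nil =>
    cases rev with
    | true => exact absurd rfl (hrev rfl)
    | false =>
      simp [parse_gaf, parse_gaf_alt, PySem.List.enumerate_nil]
  | cons v rest =>
    cases rest with
    | nil =>
      cases rev with
      | false =>
        simp only [parse_gaf, parse_gaf_alt, PySem.List.enumerate_cons,
          PySem.List.enumerate_nil, List.foldl_cons, List.foldl_nil, pvStepA]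
        simp [PySem.List.pyGet?_neg_one, sub_self, pvSliceResolved]
      | true =>
        simp only [parse_gaf, parse_gaf_alt, PySem.List.enumerate_cons,
          PySem.List.enumerate_nil, List.foldl_cons, List.foldl_nil, pvStepA]
        simp [PySem.List.pyGet?_neg_one, sub_self, pvSliceResolved]
    | cons w t =>
      have hne : (w :: t : List String) ≠ [] := by simp
      obtain ⟨mid, lastv, hdec⟩ := (List.eq_nil_or_concat (w :: t)).resolve_left hne
      rw [show (v :: w :: t : List String) = v :: (mid ++ [lastv]) from by simp [hdec]]
      have hrest : (mid ++ [lastv] : List String) ≠ [] := by simp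
      have hn0 : ¬ (((v :: (mid ++ [lastv]) : List String).length : Int) = 0) := by simp; omega
      cases rev with
      | false =>
        simp only [parse_gaf, parse_gaf_alt, Bool.false_eq_true, if_false, if_neg hn0]
        rw [pvKey_nonrev vertex_labels f_o l_o v (mid ++ [lastv]) hrest _ rfl]
        have hN2 : (((v :: (mid ++ [lastv])) : List String).length : Int) = (mid.length : Int) + 2 := by
          simp; omega
        rw [pvFlat_nonrev vertex_labels f_o (l_o - pvS vertex_labels (v :: (mid ++ [lastv]))) v lastv mid _ hN2]
        have hm0 : (PySem.List.pyGet? ((v :: (mid ++ [lastv])).map (pvLab vertex_labels)) 0).getD []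
            = pvLab vertex_labels v := by simp
        have hmL : (PySem.List.pyGet? ((v :: (mid ++ [lastv])).map (pvLab vertex_labels)) (-1)).getD []
            = pvLab vertex_labels lastv := by
          rw [PySem.List.pyGet?_neg_one,
            show (v :: (mid ++ [lastv])).map (pvLab vertex_labels)
              = ((v :: mid).map (pvLab vertex_labels)) ++ [pvLab vertex_labels lastv] from by simp,
            List.getLast?_concat]
          rfl
        rw [hm0, hmL, pvSeq_nonrev vertex_labels v lastv mid f_o l_o]
        have hpre : (((v :: (mid ++ [lastv])).map (pvLab vertex_labels)).map (fun l => (l.length : Int))).sum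
            - ((pvLab vertex_labels lastv).length : Int) = pvS vertex_labels (v :: (mid ++ [lastv])) := by
          rw [pvSum_eq_flatten_length, pvS_concat]
          simp
          omega
        rw [hpre]
      | true =>
        have hp0 : (PySem.List.pyGet? (v :: (mid ++ [lastv])) 0).getD "" = v := by simp
        have hpL : (PySem.List.pyGet? (v :: (mid ++ [lastv])) (-1)).getD "" = lastv := by
          rw [PySem.List.pyGet?_neg_one,
            show (v :: (mid ++ [lastv]) : List String) = (v :: mid) ++ [lastv] from by simp,
            List.getLast?_concat]
          rfl
        have hN2 : (((v :: (mid ++ [lastv])) : List String).length : Int) = (mid.length : Int) + 2 := by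
          simp; omega
        simp only [parse_gaf, parse_gaf_alt, if_true, if_neg hn0, hp0, hpL]
        rw [pvKey_rev vertex_labels (((pvLab vertex_labels v).length : Int) - f_o)
          (((pvLab vertex_labels lastv).length : Int) - l_o) v (mid ++ [lastv]) hrest _ rfl]
        rw [pvFlat_rev vertex_labels (((pvLab vertex_labels v).length : Int) - f_o)
          ((((pvLab vertex_labels lastv).length : Int) - l_o) + pvS vertex_labels (v :: (mid ++ [lastv])))
          v lastv mid _ hN2]
        have hm0 : (PySem.List.pyGet? ((v :: (mid ++ [lastv])).map (pvLab vertex_labels)) 0).getD []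
            = pvLab vertex_labels v := by simp
        have hmL : (PySem.List.pyGet? ((v :: (mid ++ [lastv])).map (pvLab vertex_labels)) (-1)).getD []
            = pvLab vertex_labels lastv := by
          rw [PySem.List.pyGet?_neg_one,
            show (v :: (mid ++ [lastv])).map (pvLab vertex_labels)
              = ((v :: mid).map (pvLab vertex_labels)) ++ [pvLab vertex_labels lastv] from by simp,
            List.getLast?_concat]
          rfl
        have hpre : (((v :: (mid ++ [lastv])).map (pvLab vertex_labels)).map (fun l => (l.length : Int))).sum
            - ((pvLab vertex_labels lastv).length : Int) = pvS vertex_labels (v :: (mid ++ [lastv])) := by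
          rw [pvSum_eq_flatten_length, pvS_concat]
          simp
          omega
        rw [hm0, hmL, hpre]
        rw [pvSeq_rev vertex_labels v lastv mid (((pvLab vertex_labels v).length : Int) - f_o)
          ((((pvLab vertex_labels lastv).length : Int) - l_o) + pvS vertex_labels (v :: (mid ++ [lastv])))]

-- ===== VERDICT (by name: the statement is the Claim_ definition above) =====
theorem parse_gaf_spec : Claim_equal_parse_gaf := by
  intro raw_gaf vertex_labels _ hpre
  exact parse_gaf_agree raw_gaf vertex_labels (fun h => (hpre.2 h).1)
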